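-- pv_equiv track=rewrite | github.com/princeton-eats/princetoneats | src/princetoneats/scrapedining.py | get_dietary_tags
-- ===== SOURCE A (Python) =====
-- def get_dietary_tags(ingredients, allergens):
--     tags = []
--
--     ing_lower = [i.lower() for i in ingredients]
--     all_lower = [a.lower() for a in allergens]
--
--     if not any(
--         haram in ing
--         for haram in [
--             "pork",
--             "bacon",
--             "ham",
--             "lard",
--             "alcohol",
--             "beer",
--             "wine",
--             "gelatin",
--         ]
--         for ing in ing_lower
--     ):
--         tags.append("Halal")
--
--     if not any(
--         gluten in ing + " " + al
--         for gluten in ["wheat", "gluten", "barley", "rye", "malt", "semolina"]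
--         for ing in ing_lower
--         for al in all_lower
--     ):
--         tags.append("Gluten Free")
--
--     if not any(
--         dairy in ing + " " + al
--         for dairy in ["milk", "cheese", "butter", "cream", "yogurt", "casein", "whey"]
--         for ing in ing_lower
--         for al in all_lower
--     ):
--         tags.append("Dairy Free")
--
--     if not any("peanut" in a for a in all_lower):
--         tags.append("Peanut Allergy Safe")
--
--     return tags
-- ===== SOURCE B (Python) =====
-- # Single pass over each list with boolean flags: O((n+m)*k) instead of A's
-- # cross-product O(n*m*k) scans for the gluten/dairy checks.
-- # Intended difference: when exactly one of the two lists is empty, A's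
-- # gluten/dairy cross-product is empty so A always grants "Gluten Free" /
-- # "Dairy Free" even if the other list names wheat/milk; B checks both lists.
--
-- _HARAM = ("pork", "bacon", "ham", "lard", "alcohol", "beer", "wine", "gelatin")
-- _GLUTEN = ("wheat", "gluten", "barley", "rye", "malt", "semolina")
-- _DAIRY = ("milk", "cheese", "butter", "cream", "yogurt", "casein", "whey")
--
--
-- def get_dietary_tags(ingredients, allergens):
--     haram = gluten = dairy = peanut = False
--     for s in ingredients:
--         t = s.lower()
--         haram = haram or any(k in t for k in _HARAM)
--         gluten = gluten or any(k in t for k in _GLUTEN)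
--         dairy = dairy or any(k in t for k in _DAIRY)
--     for s in allergens:
--         t = s.lower()
--         gluten = gluten or any(k in t for k in _GLUTEN)
--         dairy = dairy or any(k in t for k in _DAIRY)
--         peanut = peanut or "peanut" in t
--     tags = []
--     if not haram:
--         tags.append("Halal")
--     if not gluten:
--         tags.append("Gluten Free")
--     if not dairy:
--         tags.append("Dairy Free")
--     if not peanut:
--         tags.append("Peanut Allergy Safe")
--     return tags
-- ===== Notes on version B (the rewrite author's own statement) =====
-- stated objective: faster
-- what changed: Replaced A's keyword-major cross-product scans (each gluten/dairy keyword searched in every ingredient+" "+allergen concatenation) with a single pass over each list that accumulates boolean flags per category.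
-- intended difference: When exactly one of the two lists is empty and the other mentions a gluten/dairy keyword, A's ingredient-by-allergen cross-product is empty so A still grants "Gluten Free"/"Dairy Free" (e.g. A(["wheat"], []) includes "Gluten Free"); B scans both lists independently and withholds the tag, which is the intended behaviour. — e.g. on get_dietary_tags(["wheat"], []): A returns ["Halal", "Gluten Free", "Dairy Free", "Peanut Allergy Safe"], B returns ["Halal", "Dairy Free", "Peanut Allergy Safe"]
import Mathlib
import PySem

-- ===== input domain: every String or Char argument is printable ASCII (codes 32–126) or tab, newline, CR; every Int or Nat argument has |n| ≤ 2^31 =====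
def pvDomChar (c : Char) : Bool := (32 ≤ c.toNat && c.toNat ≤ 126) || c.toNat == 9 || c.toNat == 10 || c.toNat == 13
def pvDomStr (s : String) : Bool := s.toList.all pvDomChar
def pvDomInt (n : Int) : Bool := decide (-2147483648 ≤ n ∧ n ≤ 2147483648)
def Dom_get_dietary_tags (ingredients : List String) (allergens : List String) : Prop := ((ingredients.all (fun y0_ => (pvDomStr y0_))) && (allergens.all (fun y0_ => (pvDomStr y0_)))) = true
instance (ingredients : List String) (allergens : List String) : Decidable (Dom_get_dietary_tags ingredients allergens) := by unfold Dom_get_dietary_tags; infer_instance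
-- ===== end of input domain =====

-- B replaces A's keyword × ingredient × allergen cross-product scans (each gluten/dairy
-- keyword is searched in every concatenation ing + " " + al) by ONE pass over each list
-- with boolean flags. Strings are represented as char lists (PySem.Chars), exact for
-- Python's str.lower and the `in` substring test.

def pvHaram : List (List Char) :=
  ["pork".toList, "bacon".toList, "ham".toList, "lard".toList,
   "alcohol".toList, "beer".toList, "wine".toList, "gelatin".toList]
def pvGluten : List (List Char) :=
  ["wheat".toList, "gluten".toList, "barley".toList, "rye".toList, "malt".toList, "semolina".toList]
def pvDairy : List (List Char) :=
  ["milk".toList, "cheese".toList, "butter".toList, "cream".toList,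
   "yogurt".toList, "casein".toList, "whey".toList]

-- ===== PORT A =====
-- literal transliteration: `ing + " " + al` on char lists is `ing ++ [' '] ++ al`
def get_dietary_tags (ingredients : List String) (allergens : List String) : List String :=
  let ing_lower := ingredients.map (fun i => PySem.Chars.lower i.toList)
  let all_lower := allergens.map (fun a => PySem.Chars.lower a.toList)
  let tags : List String := []
  let tags := if pvHaram.any (fun haram => ing_lower.any (fun ing => PySem.Chars.isIn haram ing))
    then tags else tags ++ ["Halal"]
  let tags := if pvGluten.any (fun g => ing_lower.any (fun ing => all_lower.any (fun al =>
      PySem.Chars.isIn g (ing ++ [' '] ++ al))))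
    then tags else tags ++ ["Gluten Free"]
  let tags := if pvDairy.any (fun d => ing_lower.any (fun ing => all_lower.any (fun al =>
      PySem.Chars.isIn d (ing ++ [' '] ++ al))))
    then tags else tags ++ ["Dairy Free"]
  let tags := if all_lower.any (fun a => PySem.Chars.isIn "peanut".toList a)
    then tags else tags ++ ["Peanut Allergy Safe"]
  tags

-- ===== PORT B =====
-- one fold over the ingredients (haram, gluten, dairy flags) …
def pvStep1 (fl : Bool × Bool × Bool) (s : String) : Bool × Bool × Bool :=
  let t := PySem.Chars.lower s.toList
  (fl.1 || pvHaram.any (fun k => PySem.Chars.isIn k t),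
   fl.2.1 || pvGluten.any (fun k => PySem.Chars.isIn k t),
   fl.2.2 || pvDairy.any (fun k => PySem.Chars.isIn k t))

-- … and one fold over the allergens (gluten, dairy, peanut flags)
def pvStep2 (fl : Bool × Bool × Bool) (s : String) : Bool × Bool × Bool :=
  let t := PySem.Chars.lower s.toList
  (fl.1 || pvGluten.any (fun k => PySem.Chars.isIn k t),
   fl.2.1 || pvDairy.any (fun k => PySem.Chars.isIn k t),
   fl.2.2 || PySem.Chars.isIn "peanut".toList t)

def get_dietary_tags_alt (ingredients : List String) (allergens : List String) : List String :=
  let st1 := ingredients.foldl pvStep1 (false, false, false)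
  let st2 := allergens.foldl pvStep2 (st1.2.1, st1.2.2, false)
  let tags : List String := []
  let tags := if st1.1 then tags else tags ++ ["Halal"]
  let tags := if st2.1 then tags else tags ++ ["Gluten Free"]
  let tags := if st2.2.1 then tags else tags ++ ["Dairy Free"]
  let tags := if st2.2.2 then tags else tags ++ ["Peanut Allergy Safe"]
  tags

-- ===== PRECONDITION & SPEC =====
-- some string of ss contains some keyword of kws (case-insensitively)
def pvMentions (kws : List (List Char)) (ss : List String) : Bool :=
  ss.any (fun s => kws.any (fun k => PySem.Chars.isIn k (PySem.Chars.lower s.toList)))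

-- When exactly one of the two lists is empty and the other names a gluten/dairy keyword,
-- A's gluten/dairy cross-product over ingredient×allergen pairs is empty, so A wrongly
-- grants "Gluten Free"/"Dairy Free"; B checks both lists and withholds the tag, which is
-- the intended behaviour.
def D_get_dietary_tags (ingredients : List String) (allergens : List String) : Prop :=
  (ingredients = [] ∧ allergens ≠ [] ∧ pvMentions (pvGluten ++ pvDairy) allergens = true) ∨
  (allergens = [] ∧ ingredients ≠ [] ∧ pvMentions (pvGluten ++ pvDairy) ingredients = true)
instance (ingredients : List String) (allergens : List String) : Decidable (D_get_dietary_tags ingredients allergens) := by unfold D_get_dietary_tags; infer_instance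

def Spec_get_dietary_tags (ingredients : List String) (allergens : List String) (out : List String) : Prop := ¬ D_get_dietary_tags ingredients allergens → out = get_dietary_tags_alt ingredients allergens
instance (ingredients : List String) (allergens : List String) (out : List String) : Decidable (Spec_get_dietary_tags ingredients allergens out) := by unfold Spec_get_dietary_tags; infer_instance

def pvDiffWitness_get_dietary_tags : List String × List String := (["wheat"], [])
def pvDiffWitnessOut_get_dietary_tags : (List String) × (List String) :=
  (["Halal", "Gluten Free", "Dairy Free", "Peanut Allergy Safe"],
   ["Halal", "Dairy Free", "Peanut Allergy Safe"])

-- ===== CLAIM (what is proved, stated in full; the proofs are below) =====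
def Claim_unchanged_get_dietary_tags : Prop := ∀ (ingredients : List String) (allergens : List String), Dom_get_dietary_tags ingredients allergens → Spec_get_dietary_tags ingredients allergens (get_dietary_tags ingredients allergens)
def Claim_changed_get_dietary_tags : Prop := Dom_get_dietary_tags (pvDiffWitness_get_dietary_tags.1) (pvDiffWitness_get_dietary_tags.2) ∧ D_get_dietary_tags (pvDiffWitness_get_dietary_tags.1) (pvDiffWitness_get_dietary_tags.2) ∧ get_dietary_tags (pvDiffWitness_get_dietary_tags.1) (pvDiffWitness_get_dietary_tags.2) = pvDiffWitnessOut_get_dietary_tags.1 ∧ get_dietary_tags_alt (pvDiffWitness_get_dietary_tags.1) (pvDiffWitness_get_dietary_tags.2) = pvDiffWitnessOut_get_dietary_tags.2 ∧ pvDiffWitnessOut_get_dietary_tags.1 ≠ pvDiffWitnessOut_get_dietary_tags.2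

-- ===== LEMMAS AND PROOFS =====

-- a prefix of x ++ c :: y avoiding c is a prefix of x
lemma pv_prefix_cut {kw x y : List Char} {c : Char} (hc : c ∉ kw)
    (h : kw <+: x ++ c :: y) : kw <+: x := by
  by_cases hl : kw.length ≤ x.length
  · exact List.prefix_of_prefix_length_le h (List.prefix_append x (c :: y)) hl
  · exfalso
    have hi : x.length < kw.length := by omega
    have hlen : x.length < (x ++ c :: y).length := by simp
    have hget : kw[x.length]'hi = (x ++ c :: y)[x.length]'hlen := h.getElem hi
    have hc' : (x ++ c :: y)[x.length]'hlen = c := by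
      rw [List.getElem_append_right (Nat.le_refl x.length)]
      simp
    have hmem : kw[x.length]'hi ∈ kw := List.getElem_mem hi
    rw [hget, hc'] at hmem
    exact hc hmem

-- splitting a substring test at a separator the needle cannot contain
lemma pv_isIn_sep (kw x y : List Char) (hc : ' ' ∉ kw) :
    PySem.Chars.isIn kw (x ++ ' ' :: y) = (PySem.Chars.isIn kw x || PySem.Chars.isIn kw y) := by
  rw [Bool.eq_iff_iff, Bool.or_eq_true,
    ← PySem.Chars.exists_prefix_drop_iff_isIn, ← PySem.Chars.exists_prefix_drop_iff_isIn,
    ← PySem.Chars.exists_prefix_drop_iff_isIn]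
  constructor
  · rintro ⟨j, hj⟩
    by_cases hjx : j ≤ x.length
    · left
      refine ⟨j, pv_prefix_cut (y := y) hc ?_⟩
      rwa [List.drop_append_of_le_length hjx] at hj
    · right
      refine ⟨j - x.length - 1, ?_⟩
      have h2 : j = x.length + ((j - x.length - 1) + 1) := by omega
      rw [h2, List.drop_append] at hj
      rwa [List.drop_eq_nil_of_le (Nat.le_add_right _ _), List.nil_append,
        Nat.add_sub_cancel_left, List.drop_succ_cons] at hj
  · rintro (⟨j, hj⟩ | ⟨j, hj⟩)
    · refine ⟨min j x.length, ?_⟩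
      rw [List.drop_append_of_le_length (Nat.min_le_right _ _)]
      have hxd : x.drop (min j x.length) = x.drop j := by
        rcases Nat.le_total j x.length with h | h
        · rw [Nat.min_eq_left h]
        · rw [Nat.min_eq_right h, List.drop_eq_nil_of_le h, List.drop_eq_nil_of_le (Nat.le_refl _)]
      rw [hxd]
      obtain ⟨t, ht⟩ := hj
      exact ⟨t ++ ' ' :: y, by rw [← List.append_assoc, ht]⟩
    · refine ⟨x.length + (j + 1), ?_⟩
      rw [List.drop_append, List.drop_eq_nil_of_le (Nat.le_add_right _ _), List.nil_append,
        Nat.add_sub_cancel_left, List.drop_succ_cons]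
      exact hj

lemma pv_sp_gluten : ∀ k ∈ pvGluten, ' ' ∉ k := by decide
lemma pv_sp_dairy : ∀ k ∈ pvDairy, ' ' ∉ k := by decide

lemma pv_mentions_nil (kws : List (List Char)) : pvMentions kws [] = false := rfl

lemma pv_mentions_append (k1 k2 : List (List Char)) (ss : List String) :
    pvMentions (k1 ++ k2) ss = (pvMentions k1 ss || pvMentions k2 ss) := by
  rw [Bool.eq_iff_iff]
  simp only [pvMentions, Bool.or_eq_true, List.any_eq_true, List.mem_append]
  constructor
  · rintro ⟨s, hs, k, hk | hk, h⟩
    · exact Or.inl ⟨s, hs, k, hk, h⟩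
    · exact Or.inr ⟨s, hs, k, hk, h⟩
  · rintro (⟨s, hs, k, hk, h⟩ | ⟨s, hs, k, hk, h⟩)
    · exact ⟨s, hs, k, Or.inl hk, h⟩
    · exact ⟨s, hs, k, Or.inr hk, h⟩

-- A's haram test (keyword-major over lowered ingredients) is pvMentions
lemma pv_halalA (ing : List String) :
    (pvHaram.any (fun haram => (ing.map (fun i => PySem.Chars.lower i.toList)).any
      (fun x => PySem.Chars.isIn haram x))) = pvMentions pvHaram ing := by
  rw [Bool.eq_iff_iff]
  simp only [pvMentions, List.any_eq_true, List.mem_map]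
  constructor
  · rintro ⟨k, hk, _, ⟨s, hs, rfl⟩, h⟩
    exact ⟨s, hs, k, hk, h⟩
  · rintro ⟨s, hs, k, hk, h⟩
    exact ⟨k, hk, _, ⟨s, hs, rfl⟩, h⟩

-- A's cross-product test over ing × al, characterised
lemma pv_crossA (kws : List (List Char)) (hsp : ∀ k ∈ kws, ' ' ∉ k) (ing al : List String) :
    (kws.any (fun g => (ing.map (fun i => PySem.Chars.lower i.toList)).any (fun x =>
        (al.map (fun a => PySem.Chars.lower a.toList)).any (fun z =>
          PySem.Chars.isIn g (x ++ [' '] ++ z))))) =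
    ((decide (al ≠ []) && pvMentions kws ing) || (decide (ing ≠ []) && pvMentions kws al)) := by
  rw [Bool.eq_iff_iff]
  simp only [pvMentions, List.any_eq_true, List.mem_map, Bool.or_eq_true, Bool.and_eq_true,
    decide_eq_true_eq]
  constructor
  · rintro ⟨k, hk, _, ⟨i, hi, rfl⟩, _, ⟨a, ha, rfl⟩, h⟩
    rw [List.append_assoc, List.singleton_append, pv_isIn_sep _ _ _ (hsp k hk)] at h
    rcases Bool.or_eq_true_iff.mp h with h | h
    · exact Or.inl ⟨List.ne_nil_of_mem ha, i, hi, k, hk, h⟩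
    · exact Or.inr ⟨List.ne_nil_of_mem hi, a, ha, k, hk, h⟩
  · rintro (⟨hal, i, hi, k, hk, h⟩ | ⟨hing, a, ha, k, hk, h⟩)
    · obtain ⟨a, ha⟩ := List.exists_mem_of_ne_nil al hal
      refine ⟨k, hk, _, ⟨i, hi, rfl⟩, _, ⟨a, ha, rfl⟩, ?_⟩
      rw [List.append_assoc, List.singleton_append, pv_isIn_sep _ _ _ (hsp k hk), h]
      simp
    · obtain ⟨i, hi⟩ := List.exists_mem_of_ne_nil ing hing
      refine ⟨k, hk, _, ⟨i, hi, rfl⟩, _, ⟨a, ha, rfl⟩, ?_⟩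
      rw [List.append_assoc, List.singleton_append, pv_isIn_sep _ _ _ (hsp k hk), h]
      simp

-- A's peanut test over lowered allergens
lemma pv_peanutA (al : List String) :
    ((al.map (fun a => PySem.Chars.lower a.toList)).any (fun a =>
      PySem.Chars.isIn "peanut".toList a)) =
    (al.any (fun a => PySem.Chars.isIn "peanut".toList (PySem.Chars.lower a.toList))) := by
  rw [List.any_map]; rfl

-- B's first fold computes the three ingredient flags
lemma pv_fold1 (ing : List String) (h g d : Bool) :
    ing.foldl pvStep1 (h, g, d) =
      (h || pvMentions pvHaram ing, g || pvMentions pvGluten ing, d || pvMentions pvDairy ing) := by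
  induction ing generalizing h g d with
  | nil => simp [pvMentions]
  | cons s ss ih => simp [pvStep1, ih, pvMentions, Bool.or_assoc]

-- B's second fold computes the three allergen flags
lemma pv_fold2 (al : List String) (g d p : Bool) :
    al.foldl pvStep2 (g, d, p) =
      (g || pvMentions pvGluten al, d || pvMentions pvDairy al,
       p || al.any (fun a => PySem.Chars.isIn "peanut".toList (PySem.Chars.lower a.toList))) := by
  induction al generalizing g d p with
  | nil => simp [pvMentions]
  | cons s ss ih => simp [pvStep2, ih, pvMentions, Bool.or_assoc]

-- ===== VERDICT (by name: the statement is the Claim_ definition above) =====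
theorem get_dietary_tags_spec : Claim_unchanged_get_dietary_tags := by
  intro ingredients allergens _ hD
  unfold get_dietary_tags get_dietary_tags_alt
  simp only [pv_fold1, pv_fold2, Bool.false_or, pv_halalA,
    pv_crossA pvGluten pv_sp_gluten, pv_crossA pvDairy pv_sp_dairy, pv_peanutA]
  by_cases hi : ingredients = [] <;> by_cases ha : allergens = []
  · subst hi; subst ha; rfl
  · subst hi
    have hm : pvMentions (pvGluten ++ pvDairy) allergens = false := by
      cases h : pvMentions (pvGluten ++ pvDairy) allergens with
      | false => rfl
      | true => exact absurd (Or.inl ⟨rfl, ha, h⟩) hD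
    rw [pv_mentions_append] at hm
    rcases Bool.or_eq_false_iff.mp hm with ⟨hg, hd⟩
    simp [pv_mentions_nil, hg, hd]
  · subst ha
    have hm : pvMentions (pvGluten ++ pvDairy) ingredients = false := by
      cases h : pvMentions (pvGluten ++ pvDairy) ingredients with
      | false => rfl
      | true => exact absurd (Or.inr ⟨rfl, hi, h⟩) hD
    rw [pv_mentions_append] at hm
    rcases Bool.or_eq_false_iff.mp hm with ⟨hg, hd⟩
    simp [pv_mentions_nil, hg, hd]
  · simp [hi, ha]

theorem get_dietary_tags_changed : Claim_changed_get_dietary_tags := by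
  unfold Claim_changed_get_dietary_tags; decide
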